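-- pv_equiv track=rewrite | github.com/warriors44/DNAWorks | dnaworks.py | expand_and_fragment
-- ===== SOURCE A (Python) =====
-- from typing import Literal, Optional, List, Tuple, Dict
--
-- def expand_and_fragment(problem_indices: set, num_codons: int,offset: int = 1) -> List[List[int]]:
--     """
--     Expand problem codons by adding ±offset neighbors, then group consecutive indices into fragments.
--
--     Args:
--         problem_indices: Set of problematic codon indices
--         num_codons: Total number of codons
--
--     Returns:
--         List of fragments. Each fragment is a sorted list of codon indices.
--     """
--     # Add ±offset neighbors
--     expanded = set()
--     for idx in problem_indices:
--         expanded.add(idx)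
--         if idx > offset:
--             expanded.add(idx - offset)
--         if idx < num_codons - offset:
--             expanded.add(idx + offset)
--
--     if not expanded:
--         return []
--
--     # Sort and group consecutive indices
--     sorted_indices = sorted(expanded)
--     fragments = []
--     current_fragment = [sorted_indices[0]]
--
--     for i in range(1, len(sorted_indices)):
--         if sorted_indices[i] == current_fragment[-1] + 1:
--             current_fragment.append(sorted_indices[i])
--         else:
--             fragments.append(current_fragment)
--             current_fragment = [sorted_indices[i]]
--     fragments.append(current_fragment)
--
--     return fragments
-- ===== SOURCE B (Python) =====
-- def expand_and_fragment(problem_indices, num_codons, offset=1):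
--     """Expand by +/-offset neighbours via set-comprehension unions, then recover the
--     fragments by the hash-set run-detection technique: an index x starts a fragment
--     iff x-1 is absent from the set; from each start walk forward by membership tests."""
--     expanded = (set(problem_indices)
--                 | {i - offset for i in problem_indices if i > offset}
--                 | {i + offset for i in problem_indices if i < num_codons - offset})
--     fragments = []
--     for start in sorted(x for x in expanded if x - 1 not in expanded):
--         frag = []
--         x = start
--         while x in expanded:
--             frag.append(x)
--             x += 1
--         fragments.append(frag)
--     return fragments
-- ===== Notes on version B (the rewrite author's own statement) =====
-- stated objective: alternative
-- what changed: B builds the expanded set as a union of three set comprehensions and replaces A's sort-the-whole-set-then-group-consecutive pass by the hash-set run-detection algorithm: only fragment starts (x with x-1 not in the set) are sorted, and each fragment is produced by walking forward with membership tests.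
import Mathlib
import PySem

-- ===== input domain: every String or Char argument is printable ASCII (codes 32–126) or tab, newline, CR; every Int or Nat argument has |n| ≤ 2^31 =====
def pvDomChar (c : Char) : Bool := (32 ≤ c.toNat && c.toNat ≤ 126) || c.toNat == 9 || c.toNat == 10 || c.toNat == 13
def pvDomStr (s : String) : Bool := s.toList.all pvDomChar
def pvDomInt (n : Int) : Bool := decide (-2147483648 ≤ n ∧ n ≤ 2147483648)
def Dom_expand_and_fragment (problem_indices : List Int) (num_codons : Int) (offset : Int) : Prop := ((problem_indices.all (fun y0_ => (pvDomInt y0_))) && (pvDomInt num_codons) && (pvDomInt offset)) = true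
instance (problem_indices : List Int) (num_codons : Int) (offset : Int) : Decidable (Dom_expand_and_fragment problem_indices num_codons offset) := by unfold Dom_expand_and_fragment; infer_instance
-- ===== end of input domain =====

-- B replaces A's sort-everything-then-group-consecutive pass by the hash-set run-detection
-- algorithm (sort only the fragment starts, walk each run by membership tests); alternative
-- structure, similar cost.

-- ===== PORT A =====
def expand_and_fragment (problem_indices : List Int) (num_codons : Int) (offset : Int) : List (List Int) :=
  -- expanded = set(); for idx in problem_indices: add idx, idx-offset (if idx>offset), idx+offset (if idx<num_codons-offset)
  let expanded : PySem.Set Int := problem_indices.foldl (fun s idx =>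
    let s1 := PySem.Set.add s idx
    let s2 := if offset < idx then PySem.Set.add s1 (idx - offset) else s1
    if idx < num_codons - offset then PySem.Set.add s2 (idx + offset) else s2) PySem.Set.empty
  if expanded = [] then []
  else
    let sorted_indices := PySem.List.sorted expanded (fun x => x) false
    let st := (PySem.List.pyRange 1 (sorted_indices.length : Int) 1).foldl
      (fun (st : List (List Int) × List Int) i =>
        if PySem.List.pyGetD sorted_indices i 0 = PySem.List.pyGetD st.2 (-1) 0 + 1 then
          (st.1, st.2 ++ [PySem.List.pyGetD sorted_indices i 0])
        else
          (st.1 ++ [st.2], [PySem.List.pyGetD sorted_indices i 0]))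
      (([] : List (List Int)), [PySem.List.pyGetD sorted_indices 0 0])
    st.1 ++ [st.2]

-- ===== PORT B =====
-- the `while x in expanded` walk of Source B; fuel only makes the loop total (|expanded| steps
-- always suffice: the walk visits distinct members of `expanded`), the computed list is exact
def pywalk (E : List Int) : Nat → Int → List Int
  | 0, _ => []
  | f + 1, x => if x ∈ E then x :: pywalk E f (x + 1) else []

def expand_and_fragment_alt (problem_indices : List Int) (num_codons : Int) (offset : Int) : List (List Int) :=
  -- expanded = set(pi) | {i-off for i in pi if i>off} | {i+off for i in pi if i<nc-off}
  let expanded : PySem.Set Int :=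
    PySem.Set.union (PySem.Set.union (PySem.Set.ofList problem_indices)
      (PySem.Set.ofList ((problem_indices.filter (fun i => offset < i)).map (fun i => i - offset))))
      (PySem.Set.ofList ((problem_indices.filter (fun i => i < num_codons - offset)).map (fun i => i + offset)))
  -- for start in sorted(x for x in expanded if x - 1 not in expanded): walk the run from start
  (PySem.List.sorted (expanded.filter (fun x => decide ((x - 1) ∉ expanded))) (fun x => x) false).map
    (fun s => pywalk expanded expanded.length s)

-- ===== PRECONDITION & SPEC =====
def Spec_expand_and_fragment (problem_indices : List Int) (num_codons : Int) (offset : Int) (out : List (List Int)) : Prop := out = expand_and_fragment_alt problem_indices num_codons offset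
instance (problem_indices : List Int) (num_codons : Int) (offset : Int) (out : List (List Int)) : Decidable (Spec_expand_and_fragment problem_indices num_codons offset out) := by unfold Spec_expand_and_fragment; infer_instance

-- ===== CLAIM (what is proved, stated in full; the proofs are below) =====
def Claim_equal_expand_and_fragment : Prop := ∀ (problem_indices : List Int) (num_codons : Int) (offset : Int), Dom_expand_and_fragment problem_indices num_codons offset → Spec_expand_and_fragment problem_indices num_codons offset (expand_and_fragment problem_indices num_codons offset)

-- ===== LEMMAS AND PROOFS =====

-- one grouping step on the ascending list, consumed from the right
def cstep (x : Int) (ch : List (List Int)) : List (List Int) :=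
  match ch with
  | (y :: f) :: rest => if y = x + 1 then (x :: y :: f) :: rest else [x] :: (y :: f) :: rest
  | other => [x] :: other

-- canonical grouping of an ascending list into maximal consecutive runs
def chunks (l : List Int) : List (List Int) := l.foldr cstep []

-- closing A's loop state (current fragment `cur`) against the chunks of the rest
def glue (cur : List Int) (ch : List (List Int)) : List (List Int) :=
  match ch with
  | (y :: f) :: rest => if y = PySem.List.pyGetD cur (-1) 0 + 1 then (cur ++ y :: f) :: rest else cur :: (y :: f) :: rest
  | other => cur :: other

theorem chunks_nil : chunks [] = [] := rfl
theorem chunks_cons (x : Int) (l : List Int) : chunks (x :: l) = cstep x (chunks l) := rfl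

theorem glue_snoc (cur : List Int) (y : Int) (hy : y = PySem.List.pyGetD cur (-1) 0 + 1)
    (ch : List (List Int)) : glue (cur ++ [y]) ch = glue cur (cstep y ch) := by
  subst hy
  match ch with
  | [] => simp [glue, cstep]
  | [] :: rest => simp [glue, cstep]
  | (z :: f) :: rest =>
    by_cases hz : z = PySem.List.pyGetD cur (-1) 0 + 1 + 1 <;>
      simp [glue, cstep, PySem.List.pyGetD_neg_one_append_singleton, hz]

theorem glue_new (cur : List Int) (y : Int) (hy : ¬ y = PySem.List.pyGetD cur (-1) 0 + 1)
    (ch : List (List Int)) : cur :: glue [y] ch = glue cur (cstep y ch) := by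
  have h1 : PySem.List.pyGetD [y] (-1) 0 = y := PySem.List.pyGetD_neg_one_append_singleton (xs := []) (x := y) (d := 0)
  match ch with
  | [] => simp [glue, cstep, hy]
  | [] :: rest => simp [glue, cstep, hy]
  | (z :: f) :: rest =>
    simp only [glue, cstep, h1]
    by_cases hz : z = y + 1 <;> simp [hz, hy]

theorem glue_single (y : Int) (ch : List (List Int)) : glue [y] ch = cstep y ch := by
  have h1 : PySem.List.pyGetD [y] (-1) 0 = y := PySem.List.pyGetD_neg_one_append_singleton (xs := []) (x := y) (d := 0)
  match ch with
  | [] => simp [glue, cstep]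
  | [] :: rest => simp [glue, cstep]
  | (z :: f) :: rest =>
    simp only [glue, cstep, h1]
    by_cases hz : z = y + 1 <;> simp [hz]

-- A's fold over the tail, with arbitrary accumulated fragments and current fragment
theorem loopA (tl : List Int) (fr : List (List Int)) (cur : List Int) :
    (tl.foldl (fun (st : List (List Int) × List Int) v =>
        if v = PySem.List.pyGetD st.2 (-1) 0 + 1 then (st.1, st.2 ++ [v])
        else (st.1 ++ [st.2], [v])) (fr, cur)).1 ++
      [(tl.foldl (fun (st : List (List Int) × List Int) v =>
        if v = PySem.List.pyGetD st.2 (-1) 0 + 1 then (st.1, st.2 ++ [v])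
        else (st.1 ++ [st.2], [v])) (fr, cur)).2] = fr ++ glue cur (chunks tl) := by
  induction tl generalizing fr cur with
  | nil => simp [chunks, glue]
  | cons y tl ih =>
    simp only [List.foldl_cons]
    by_cases hy : y = PySem.List.pyGetD cur (-1) 0 + 1
    · rw [if_pos hy]
      rw [ih fr (cur ++ [y]), chunks_cons, glue_snoc cur y hy]
    · rw [if_neg hy]
      rw [ih (fr ++ [cur]) [y], chunks_cons, List.append_assoc]
      simp [glue_new cur y hy]

-- membership in A's expanded set
theorem mem_expA (num_codons offset : Int) (pi : List Int) (s : List Int) (y : Int) :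
    y ∈ pi.foldl (fun s idx =>
      let s1 := PySem.Set.add s idx
      let s2 := if offset < idx then PySem.Set.add s1 (idx - offset) else s1
      if idx < num_codons - offset then PySem.Set.add s2 (idx + offset) else s2) s ↔
    y ∈ s ∨ ∃ i ∈ pi, y = i ∨ (offset < i ∧ y = i - offset) ∨ (i < num_codons - offset ∧ y = i + offset) := by
  induction pi generalizing s with
  | nil => simp
  | cons i pi ih =>
    simp only [List.foldl_cons, ih, List.mem_cons]
    by_cases h1 : offset < i <;> by_cases h2 : i < num_codons - offset <;>
      simp [h1, h2, PySem.Set.mem_add, or_assoc]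

-- A's expanded set has no duplicates
theorem nodup_expA (num_codons offset : Int) (pi : List Int) (s : List Int) (hs : s.Nodup) :
    (pi.foldl (fun s idx =>
      let s1 := PySem.Set.add s idx
      let s2 := if offset < idx then PySem.Set.add s1 (idx - offset) else s1
      if idx < num_codons - offset then PySem.Set.add s2 (idx + offset) else s2) s).Nodup := by
  induction pi generalizing s with
  | nil => exact hs
  | cons i pi ih =>
    simp only [List.foldl_cons]
    apply ih
    by_cases h1 : offset < i <;> by_cases h2 : i < num_codons - offset <;>
      simp only [h1, h2, if_true, if_false] <;>
      first
        | exact PySem.Set.nodup_add _ _ (PySem.Set.nodup_add _ _ (PySem.Set.nodup_add _ _ hs))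
        | exact PySem.Set.nodup_add _ _ (PySem.Set.nodup_add _ _ hs)
        | exact PySem.Set.nodup_add _ _ hs

-- the two expansion phases, named for the proofs
def expA (pi : List Int) (nc off : Int) : PySem.Set Int :=
  pi.foldl (fun s idx =>
    let s1 := PySem.Set.add s idx
    let s2 := if off < idx then PySem.Set.add s1 (idx - off) else s1
    if idx < nc - off then PySem.Set.add s2 (idx + off) else s2) PySem.Set.empty

def expB (pi : List Int) (nc off : Int) : PySem.Set Int :=
  PySem.Set.union (PySem.Set.union (PySem.Set.ofList pi)
    (PySem.Set.ofList ((pi.filter (fun i => off < i)).map (fun i => i - off))))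
    (PySem.Set.ofList ((pi.filter (fun i => i < nc - off)).map (fun i => i + off)))

theorem mem_expA_iff_expB (pi : List Int) (nc off y : Int) :
    y ∈ expA pi nc off ↔ y ∈ expB pi nc off := by
  rw [show expA pi nc off = pi.foldl (fun s idx =>
    let s1 := PySem.Set.add s idx
    let s2 := if off < idx then PySem.Set.add s1 (idx - off) else s1
    if idx < nc - off then PySem.Set.add s2 (idx + off) else s2) PySem.Set.empty from rfl]
  rw [mem_expA nc off pi PySem.Set.empty y]
  simp only [PySem.Set.empty, List.not_mem_nil, false_or]
  simp only [expB, PySem.Set.mem_union, PySem.Set.mem_ofList, List.mem_map, List.mem_filter,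
    decide_eq_true_eq]
  constructor
  · rintro ⟨i, hip, rfl | ⟨h1, rfl⟩ | ⟨h2, rfl⟩⟩
    · exact Or.inl (Or.inl hip)
    · exact Or.inl (Or.inr ⟨i, ⟨hip, h1⟩, rfl⟩)
    · exact Or.inr ⟨i, ⟨hip, h2⟩, rfl⟩
  · rintro ((hip | ⟨i, ⟨hip, h1⟩, rfl⟩) | ⟨i, ⟨hip, h2⟩, rfl⟩)
    · exact ⟨y, hip, Or.inl rfl⟩
    · exact ⟨i, hip, Or.inr (Or.inl ⟨h1, rfl⟩)⟩
    · exact ⟨i, hip, Or.inr (Or.inr ⟨h2, rfl⟩)⟩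

theorem nodup_expA' (pi : List Int) (nc off : Int) : (expA pi nc off).Nodup :=
  nodup_expA nc off pi PySem.Set.empty List.nodup_nil

theorem nodup_expB (pi : List Int) (nc off : Int) : (expB pi nc off).Nodup :=
  PySem.Set.nodup_union _ _ (PySem.Set.nodup_union _ _ (PySem.Set.nodup_ofList _))

theorem perm_expA_expB (pi : List Int) (nc off : Int) : (expA pi nc off).Perm (expB pi nc off) :=
  (List.perm_ext_iff_of_nodup (nodup_expA' pi nc off) (nodup_expB pi nc off)).2
    (mem_expA_iff_expB pi nc off)

-- A's whole result is the canonical chunking of the ascending sorted expanded set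
theorem A_eq_chunks (pi : List Int) (nc off : Int) :
    expand_and_fragment pi nc off =
      chunks (PySem.List.sorted (expA pi nc off) (fun x => x) false) := by
  show (if expA pi nc off = [] then [] else
    (((PySem.List.pyRange 1 ((PySem.List.sorted (expA pi nc off) (fun x => x) false).length : Int) 1).foldl
      (fun (st : List (List Int) × List Int) i =>
        if PySem.List.pyGetD (PySem.List.sorted (expA pi nc off) (fun x => x) false) i 0 =
            PySem.List.pyGetD st.2 (-1) 0 + 1 then
          (st.1, st.2 ++ [PySem.List.pyGetD (PySem.List.sorted (expA pi nc off) (fun x => x) false) i 0])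
        else
          (st.1 ++ [st.2], [PySem.List.pyGetD (PySem.List.sorted (expA pi nc off) (fun x => x) false) i 0]))
      (([] : List (List Int)), [PySem.List.pyGetD (PySem.List.sorted (expA pi nc off) (fun x => x) false) 0 0])).1 ++
      [((PySem.List.pyRange 1 ((PySem.List.sorted (expA pi nc off) (fun x => x) false).length : Int) 1).foldl
      (fun (st : List (List Int) × List Int) i =>
        if PySem.List.pyGetD (PySem.List.sorted (expA pi nc off) (fun x => x) false) i 0 =
            PySem.List.pyGetD st.2 (-1) 0 + 1 then
          (st.1, st.2 ++ [PySem.List.pyGetD (PySem.List.sorted (expA pi nc off) (fun x => x) false) i 0])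
        else
          (st.1 ++ [st.2], [PySem.List.pyGetD (PySem.List.sorted (expA pi nc off) (fun x => x) false) i 0]))
      (([] : List (List Int)), [PySem.List.pyGetD (PySem.List.sorted (expA pi nc off) (fun x => x) false) 0 0])).2])) =
    chunks (PySem.List.sorted (expA pi nc off) (fun x => x) false)
  by_cases hE : expA pi nc off = []
  · rw [if_pos hE, hE]
    have hnil : PySem.List.sorted ([] : List Int) (fun x => x) false = [] :=
      (PySem.List.sorted_eq_nil_iff _ _ _).2 rfl
    rw [hnil, chunks_nil]
  · rw [if_neg hE]
    have hSne : PySem.List.sorted (expA pi nc off) (fun x => x) false ≠ [] :=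
      fun h => hE ((PySem.List.sorted_eq_nil_iff _ _ _).1 h)
    obtain ⟨s0, tl, hS⟩ := List.exists_cons_of_ne_nil hSne
    have hfold :
        (PySem.List.pyRange 1 ((PySem.List.sorted (expA pi nc off) (fun x => x) false).length : Int) 1).foldl
          (fun (st : List (List Int) × List Int) i =>
            if PySem.List.pyGetD (PySem.List.sorted (expA pi nc off) (fun x => x) false) i 0 =
                PySem.List.pyGetD st.2 (-1) 0 + 1 then
              (st.1, st.2 ++ [PySem.List.pyGetD (PySem.List.sorted (expA pi nc off) (fun x => x) false) i 0])
            else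
              (st.1 ++ [st.2], [PySem.List.pyGetD (PySem.List.sorted (expA pi nc off) (fun x => x) false) i 0]))
          (([] : List (List Int)), [PySem.List.pyGetD (PySem.List.sorted (expA pi nc off) (fun x => x) false) 0 0]) =
        ((PySem.List.sorted (expA pi nc off) (fun x => x) false).drop 1).foldl
          (fun (st : List (List Int) × List Int) v =>
            if v = PySem.List.pyGetD st.2 (-1) 0 + 1 then (st.1, st.2 ++ [v])
            else (st.1 ++ [st.2], [v]))
          (([] : List (List Int)), [PySem.List.pyGetD (PySem.List.sorted (expA pi nc off) (fun x => x) false) 0 0]) :=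
      PySem.List.foldl_pyRange_pyGetD' (PySem.List.sorted (expA pi nc off) (fun x => x) false) 0
        (fun (st : List (List Int) × List Int) v =>
          if v = PySem.List.pyGetD st.2 (-1) 0 + 1 then (st.1, st.2 ++ [v])
          else (st.1 ++ [st.2], [v]))
        (([] : List (List Int)), [PySem.List.pyGetD (PySem.List.sorted (expA pi nc off) (fun x => x) false) 0 0])
        (a := 1) (by omega)
    rw [hfold, hS]
    simp only [List.drop_succ_cons, List.drop_zero, PySem.List.pyGetD_zero_cons]
    rw [loopA tl [] [s0], List.nil_append, glue_single, ← chunks_cons]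

-- ===== B-side: the start-walk construction computes the canonical chunking =====

-- r is the list a+1, a+2, … (a consecutive run continuing a)
def RunFrom : Int → List Int → Prop
  | _, [] => True
  | a, b :: t => b = a + 1 ∧ RunFrom b t

theorem pywalk_notmem (E : List Int) (f : Nat) (x : Int) (hx : x ∉ E) :
    pywalk E f x = [] := by
  cases f <;> simp [pywalk, hx]

theorem run_elems_le (a : Int) (r : List Int) (hr : RunFrom a r) :
    ∀ y ∈ a :: r, y ≤ a + r.length := by
  induction r generalizing a with
  | nil => simp
  | cons b t ih =>
    obtain ⟨rfl, ht⟩ := hr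
    intro y hy
    rcases List.mem_cons.1 hy with rfl | hy
    · simp; omega
    · have := ih (a + 1) ht y hy
      simp at this ⊢; omega

theorem run_pred_mem (a : Int) (r : List Int) (hr : RunFrom a r) :
    ∀ x ∈ r, x - 1 ∈ a :: r := by
  induction r generalizing a with
  | nil => simp
  | cons b t ih =>
    obtain ⟨rfl, ht⟩ := hr
    intro x hx
    rcases List.mem_cons.1 hx with rfl | hx
    · simp
    · have := ih (a + 1) ht x hx
      rcases List.mem_cons.1 this with h | h
      · exact List.mem_cons_of_mem _ (h ▸ List.mem_cons_self)
      · exact List.mem_cons_of_mem _ (List.mem_cons_of_mem _ h)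

theorem run_last_mem (a : Int) (r : List Int) (hr : RunFrom a r) :
    a + (r.length : Int) ∈ a :: r := by
  induction r generalizing a with
  | nil => simp
  | cons b t ih =>
    obtain ⟨rfl, ht⟩ := hr
    have h := ih (a + 1) ht
    have heq : a + ((((a + 1) :: t).length : Nat) : Int) = a + 1 + (t.length : Int) := by
      simp only [List.length_cons]; push_cast; ring
    rw [heq]
    exact List.mem_cons_of_mem _ h

theorem pywalk_run (E : List Int) (r : List Int) :
    ∀ (a : Int) (fuel : Nat), r.length < fuel → RunFrom a r →
      (∀ y ∈ a :: r, y ∈ E) → (a + r.length + 1) ∉ E →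
      pywalk E fuel a = a :: r := by
  induction r with
  | nil =>
    intro a fuel hf _ hmem hout
    obtain ⟨f, rfl⟩ : ∃ f, fuel = f + 1 := ⟨fuel - 1, by omega⟩
    have ha : a ∈ E := hmem a (by simp)
    simp only [pywalk, ha, if_true]
    have : a + 1 ∉ E := by simpa using hout
    rw [pywalk_notmem E f (a + 1) this]
  | cons b t ih =>
    intro a fuel hf hr hmem hout
    obtain ⟨rfl, ht⟩ := hr
    obtain ⟨f, rfl⟩ : ∃ f, fuel = f + 1 := ⟨fuel - 1, by omega⟩
    have ha : a ∈ E := hmem a (by simp)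
    simp only [pywalk, ha, if_true]
    congr 1
    apply ih (a + 1) f (by simp at hf ⊢; omega) ht
    · intro y hy
      exact hmem y (List.mem_cons_of_mem _ hy)
    · intro h
      apply hout
      have : a + 1 + (t.length : Int) + 1 = a + ((((a + 1) :: t).length : Nat) : Int) + 1 := by
        simp only [List.length_cons]; push_cast; ring
      rwa [this] at h

-- chunks of a nonempty list starts with a chunk headed by the list head
theorem chunks_head (h : Int) (t : List Int) :
    ∃ f more, chunks (h :: t) = (h :: f) :: more := by
  rw [chunks_cons]
  match hc : chunks t with
  | [] => exact ⟨[], [], rfl⟩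
  | [] :: rest => exact ⟨[], [] :: rest, rfl⟩
  | (y :: f) :: rest =>
    by_cases hy : y = h + 1
    · exact ⟨y :: f, rest, by simp [cstep, hy]⟩
    · exact ⟨[], (y :: f) :: rest, by simp [cstep, hy]⟩

theorem chunks_run (a : Int) (r rest : List Int) (hr : RunFrom a r)
    (hrest : rest = [] ∨ ∃ h t', rest = h :: t' ∧ h ≠ a + r.length + 1) :
    chunks ((a :: r) ++ rest) = (a :: r) :: chunks rest := by
  induction r generalizing a with
  | nil =>
    rcases hrest with rfl | ⟨h, t', rfl, hne⟩
    · rfl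
    · obtain ⟨f, more, hch⟩ := chunks_head h t'
      have hne' : h ≠ a + 1 := by simpa using hne
      simp only [List.cons_append, List.nil_append, chunks_cons, hch, cstep, hne', if_false]
  | cons b t ih =>
    obtain ⟨rfl, ht⟩ := hr
    have hrest' : rest = [] ∨ ∃ h t', rest = h :: t' ∧ h ≠ (a + 1) + t.length + 1 := by
      rcases hrest with rfl | ⟨h, t', rfl, hne⟩
      · exact Or.inl rfl
      · refine Or.inr ⟨h, t', rfl, ?_⟩
        intro hh; apply hne; rw [hh]; simp; omega
    have := ih (a + 1) ht hrest'
    simp only [List.cons_append] at this ⊢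
    rw [chunks_cons, this, cstep, if_pos rfl]

-- first maximal run split of the tail
def splitRun : Int → List Int → List Int × List Int
  | _, [] => ([], [])
  | a, b :: t => if b = a + 1 then (b :: (splitRun b t).1, (splitRun b t).2) else ([], b :: t)

theorem splitRun_append (a : Int) (l : List Int) :
    (splitRun a l).1 ++ (splitRun a l).2 = l := by
  induction l generalizing a with
  | nil => rfl
  | cons b t ih =>
    by_cases hb : b = a + 1
    · subst hb; simp [splitRun, ih]
    · simp [splitRun, hb]

theorem splitRun_run (a : Int) (l : List Int) : RunFrom a (splitRun a l).1 := by
  induction l generalizing a with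
  | nil => trivial
  | cons b t ih =>
    by_cases hb : b = a + 1
    · subst hb
      simp only [splitRun, if_true]
      exact ⟨rfl, ih (a + 1)⟩
    · simp only [splitRun, hb, if_false]
      trivial

theorem splitRun_rest (a : Int) (l : List Int) :
    (splitRun a l).2 = [] ∨
      ∃ h t', (splitRun a l).2 = h :: t' ∧ h ≠ a + (splitRun a l).1.length + 1 := by
  induction l generalizing a with
  | nil => exact Or.inl rfl
  | cons b t ih =>
    by_cases hb : b = a + 1
    · subst hb
      simp only [splitRun, if_true]
      rcases ih (a + 1) with h0 | ⟨h, t', heq, hne⟩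
      · exact Or.inl h0
      · refine Or.inr ⟨h, t', heq, ?_⟩
        intro hh; apply hne; rw [hh]; simp; omega
    · simp only [splitRun, hb, if_false]
      exact Or.inr ⟨b, t, rfl, by simpa using hb⟩

-- main lemma: on a strictly ascending list S whose members are exactly the "relevant"
-- members of E (extras in E lie strictly below every element of S minus one), the
-- start-walk construction equals the canonical chunking
theorem mainLem : ∀ (n : Nat) (S E : List Int), S.length ≤ n → S.Pairwise (· < ·) →
    (∀ y ∈ S, y ∈ E) → (∀ y ∈ E, y ∈ S ∨ ∀ z ∈ S, y < z - 1) →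
    ∀ fuel : Nat, S.length ≤ fuel →
      (S.filter (fun x => decide ((x - 1) ∉ E))).map (pywalk E fuel) = chunks S := by
  intro n
  induction n with
  | zero =>
    intro S E hn _ _ _ fuel _
    have : S = [] := List.eq_nil_of_length_eq_zero (by omega)
    subst this; rfl
  | succ n ih =>
    intro S E hn hpw hSE hExtra fuel hfuel
    match hSeq : S with
    | [] => rfl
    | a :: l =>
      subst hSeq
      obtain ⟨r, rest, hsplit⟩ : ∃ r rest, splitRun a l = (r, rest) := ⟨_, _, rfl⟩
      have hl : l = r ++ rest := by rw [← splitRun_append a l, hsplit]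
      have hrun : RunFrom a r := by have := splitRun_run a l; rwa [hsplit] at this
      have hrestc : rest = [] ∨ ∃ h t', rest = h :: t' ∧ h ≠ a + r.length + 1 := by
        have := splitRun_rest a l; rwa [hsplit] at this
      subst hl
      -- facts from Pairwise
      have hpw' := hpw
      rw [List.pairwise_cons] at hpw'
      obtain ⟨halt, hpwl⟩ := hpw'
      have hpwrest : rest.Pairwise (· < ·) :=
        List.Pairwise.sublist (List.sublist_append_right r rest) hpwl
      -- every element of rest exceeds a + r.length + 1
      have hrest_big : ∀ z ∈ rest, a + r.length + 1 < z := by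
        rcases hrestc with rfl | ⟨h, t', hre, hne⟩
        · simp
        · subst hre
          intro z hz
          have hah : a < h := halt h (by simp)
          have hrh : ∀ y ∈ r, y < h := by
            intro y hy
            have := List.pairwise_append.1 hpwl
            exact this.2.2 y hy h (by simp)
          have hlast : a + (r.length : Int) < h := by
            have hmem := run_last_mem a r hrun
            rcases List.mem_cons.1 hmem with h1 | h1
            · omega
            · exact hrh _ h1
          rcases List.mem_cons.1 hz with rfl | hz'
          · omega
          · have : h < z := (List.pairwise_cons.1 hpwrest).1 z hz'
            omega
      -- run elements are ≤ a + r.length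
      have hrun_le := run_elems_le a r hrun
      -- the filter: a survives, r is removed, rest is untouched
      have hfa : (a - 1) ∉ E := by
        intro hmem
        rcases hExtra _ hmem with hS | hsmall
        · rcases List.mem_cons.1 hS with h | h
          · omega
          · rcases List.mem_append.1 h with h | h
            · have := hrun_le (a - 1) (List.mem_cons_of_mem _ h)
              have ha1 : a < a - 1 := halt _ (List.mem_append_left _ h)
              omega
            · have := halt _ (List.mem_append_right _ h)
              omega
        · have := hsmall a List.mem_cons_self
          omega
      have hfr : ∀ x ∈ r, (x - 1) ∈ E := by
        intro x hx
        exact hSE _ (by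
          have := run_pred_mem a r hrun x hx
          rcases List.mem_cons.1 this with h | h
          · exact h ▸ List.mem_cons_self
          · exact List.mem_cons_of_mem _ (List.mem_append_left _ h))
      have hfilter :
          ((a :: (r ++ rest)).filter (fun x => decide ((x - 1) ∉ E))) =
            a :: rest.filter (fun x => decide ((x - 1) ∉ E)) := by
        rw [List.filter_cons, List.filter_append]
        have h1 : (decide ((a - 1) ∉ E)) = true := by simpa using hfa
        rw [h1]
        have h2 : r.filter (fun x => decide ((x - 1) ∉ E)) = [] := by
          rw [List.filter_eq_nil_iff]
          intro x hx
          simpa using hfr x hx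
        rw [h2]
        simp
      -- the walk from a yields the first run
      have hnot : (a + r.length + 1) ∉ E := by
        intro hmem
        rcases hExtra _ hmem with hS | hsmall
        · rcases List.mem_cons.1 hS with h | h
          · omega
          · rcases List.mem_append.1 h with h | h
            · have := hrun_le _ (List.mem_cons_of_mem _ h)
              omega
            · have := hrest_big _ h
              omega
        · have := hsmall a List.mem_cons_self
          omega
      have hwalk : pywalk E fuel a = a :: r := by
        apply pywalk_run E r a fuel (by simp at hfuel; omega) hrun
        · intro y hy
          apply hSE
          rcases List.mem_cons.1 hy with rfl | h
          · exact List.mem_cons_self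
          · exact List.mem_cons_of_mem _ (List.mem_append_left _ h)
        · exact hnot
      -- recursive call on rest
      have hrec :
          (rest.filter (fun x => decide ((x - 1) ∉ E))).map (pywalk E fuel) = chunks rest := by
        apply ih rest E (by simp at hn; omega) hpwrest
        · intro y hy
          exact hSE _ (List.mem_cons_of_mem _ (List.mem_append_right _ hy))
        · intro y hy
          rcases hExtra _ hy with hS | hsmall
          · rcases List.mem_cons.1 hS with rfl | h
            · right
              intro z hz
              have := hrest_big z hz
              omega
            · rcases List.mem_append.1 h with h | h
              · right
                intro z hz
                have := hrun_le _ (List.mem_cons_of_mem _ h)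
                have := hrest_big z hz
                omega
              · exact Or.inl h
          · right
            intro z hz
            exact hsmall z (List.mem_cons_of_mem _ (List.mem_append_right _ hz))
        · simp at hfuel ⊢; omega
      rw [hfilter, List.map_cons, hwalk, hrec]
      exact (chunks_run a r rest hrun hrestc).symm

-- B's whole result is the canonical chunking of the ascending sorted expanded set
theorem B_eq_chunks (pi : List Int) (nc off : Int) :
    expand_and_fragment_alt pi nc off =
      chunks (PySem.List.sorted (expB pi nc off) (fun x => x) false) := by
  show (PySem.List.sorted ((expB pi nc off).filter (fun x => decide ((x - 1) ∉ expB pi nc off))) (fun x => x) false).map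
      (fun s => pywalk (expB pi nc off) (expB pi nc off).length s) = _
  set E := expB pi nc off with hE
  set S := PySem.List.sorted E (fun x => x) false with hS
  have hperm : S.Perm E := PySem.List.sorted_perm _ _ _
  have hSpw : S.Pairwise (· < ·) := by
    have hle : S.Pairwise (· ≤ ·) := PySem.List.sorted_pairwise _ _
    have hnd : S.Nodup := hperm.symm.nodup (nodup_expB pi nc off)
    exact (hle.and hnd).imp (fun h => lt_of_le_of_ne h.1 h.2)
  have hsf : PySem.List.sorted (E.filter (fun x => decide ((x - 1) ∉ E))) (fun x => x) false =
      S.filter (fun x => decide ((x - 1) ∉ E)) := by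
    apply PySem.List.sorted_eq_of_perm_of_pairwise_lt
    · exact hperm.filter _
    · exact hSpw.filter _
  rw [hsf]
  have hlen : S.length ≤ E.length := hperm.length_eq.le
  exact mainLem S.length S E le_rfl hSpw (fun y hy => hperm.mem_iff.1 hy)
    (fun y hy => Or.inl (hperm.mem_iff.2 hy)) E.length hlen

-- ===== VERDICT (by name: the statement is the Claim_ definition above) =====
theorem expand_and_fragment_spec : Claim_equal_expand_and_fragment := by
  intro pi nc off _
  unfold Spec_expand_and_fragment
  rw [A_eq_chunks pi nc off, B_eq_chunks pi nc off,
    PySem.List.sorted_eq_sorted_of_perm (expA pi nc off) (expB pi nc off) (fun x => x)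
      (fun _ _ h => h) (perm_expA_expB pi nc off)]
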